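-- pv_equiv track=rewrite | github.com/charliemarshall1996/lom | src/clean/lyrics_cleaner_class.py | map_vocab
-- ===== SOURCE A (Python) =====
-- def map_vocab(tokens, contractions, dropped_gs):
--
--     # Initialize list of mapped
--     # contractions
--     mapped_contractions = []
--
--     for token in tokens:
--
--         # If the token is in the
--         # CONTRACTIONS dictionary
--         if token in contractions:
--
--             # split the bi-gram and
--             # add individual tokens
--             # to mapped_contractions
--             mapped_contractions.extend(contractions[token].split())
--
--         else:  # If not a contraction
--             # just add the token as it is to mapped_contractions
--             mapped_contractions.append(token)
--
--     # Map and return dropped g's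
--     return [dropped_gs.get(token, token) for token in mapped_contractions]
-- ===== SOURCE B (Python) =====
-- def map_vocab(tokens, contractions, dropped_gs):
--     # Precompute the composed substitution: each contraction key maps directly to
--     # its fully expanded, dropped-g-mapped word list; then one flattening comprehension.
--     table = {k: [dropped_gs.get(p, p) for p in v.split()] for k, v in contractions.items()}
--     return [w
--             for t in tokens
--             for w in (table[t] if t in table else [dropped_gs.get(t, t)])]
-- ===== Notes on version B (the rewrite author's own statement) =====
-- stated objective: alternative
-- what changed: Instead of A's expand-then-remap two-stage pipeline over the token stream, B first composes the two substitutions into one precomputed table (contraction key -> fully mapped expansion) and then produces the output in a single flattening comprehension, so no intermediate expanded token list ever exists and no per-occurrence split or per-part lookup is done.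
import Mathlib
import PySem

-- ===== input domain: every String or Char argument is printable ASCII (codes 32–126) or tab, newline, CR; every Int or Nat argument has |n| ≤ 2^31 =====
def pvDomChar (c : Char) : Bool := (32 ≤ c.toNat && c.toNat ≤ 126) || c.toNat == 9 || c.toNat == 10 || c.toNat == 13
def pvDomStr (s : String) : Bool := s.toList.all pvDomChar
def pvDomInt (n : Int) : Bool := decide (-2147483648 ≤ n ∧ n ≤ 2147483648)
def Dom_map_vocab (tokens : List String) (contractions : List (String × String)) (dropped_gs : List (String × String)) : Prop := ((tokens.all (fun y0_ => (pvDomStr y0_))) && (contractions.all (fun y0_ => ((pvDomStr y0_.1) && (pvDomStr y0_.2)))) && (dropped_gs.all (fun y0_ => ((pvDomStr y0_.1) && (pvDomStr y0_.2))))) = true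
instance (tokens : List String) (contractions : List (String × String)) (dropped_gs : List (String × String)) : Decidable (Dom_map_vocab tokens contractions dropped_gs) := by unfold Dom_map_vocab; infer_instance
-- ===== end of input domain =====

-- B precomputes the composed substitution (contraction key -> fully mapped expansion) once
-- and emits the result in a single flattening comprehension; objective: alternative.

-- ===== PORT A =====
def map_vocab (tokens : List String) (contractions : List (String × String)) (dropped_gs : List (String × String)) : List String :=
  let c := PySem.Dict.mk contractions
  let d := PySem.Dict.mk dropped_gs
  -- mapped_contractions loop
  let mapped_contractions := tokens.foldl (fun acc token =>
    if c.contains token then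
      acc ++ PySem.Str.split₀ (c.getD token "")
    else
      acc ++ [token]) []
  -- final comprehension
  mapped_contractions.map (fun token => d.getD token token)

-- ===== PORT B =====
def map_vocab_alt (tokens : List String) (contractions : List (String × String)) (dropped_gs : List (String × String)) : List String :=
  let c := PySem.Dict.mk contractions
  let d := PySem.Dict.mk dropped_gs
  -- table = {k: [dropped_gs.get(p, p) for p in v.split()] for k, v in contractions.items()}
  let table := PySem.Dict.mk (c.items.map (fun kv =>
    (kv.1, (PySem.Str.split₀ kv.2).map (fun p => d.getD p p))))
  -- [w for t in tokens for w in (table[t] if t in table else [dropped_gs.get(t, t)])]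
  tokens.flatMap (fun t => if table.contains t then table.getD t [] else [d.getD t t])

-- ===== PRECONDITION & SPEC =====
def Spec_map_vocab (tokens : List String) (contractions : List (String × String)) (dropped_gs : List (String × String)) (out : List String) : Prop := out = map_vocab_alt tokens contractions dropped_gs
instance (tokens : List String) (contractions : List (String × String)) (dropped_gs : List (String × String)) (out : List String) : Decidable (Spec_map_vocab tokens contractions dropped_gs out) := by unfold Spec_map_vocab; infer_instance

-- ===== CLAIM (what is proved, stated in full; the proofs are below) =====
def Claim_equal_map_vocab : Prop := ∀ (tokens : List String) (contractions : List (String × String)) (dropped_gs : List (String × String)), Dom_map_vocab tokens contractions dropped_gs → Spec_map_vocab tokens contractions dropped_gs (map_vocab tokens contractions dropped_gs)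

-- ===== LEMMAS AND PROOFS =====

-- looking up in a dict built from value-mapped pairs = mapping over the original lookup
theorem get?_mk_map_value (F : String → List String) (l : List (String × String)) (x : String) :
    (PySem.Dict.mk (l.map (fun kv => (kv.1, F kv.2)))).get? x
      = ((PySem.Dict.mk l).get? x).map F := by
  induction l with
  | nil => simp [PySem.Dict.get?]
  | cons kv rest ih =>
      obtain ⟨k, v⟩ := kv
      simp only [List.map_cons, PySem.Dict.get?_mk_cons]
      by_cases h : (k == x) = true
      · rw [if_pos h, if_pos h]; rfl
      · rw [if_neg h, if_neg h]; exact ih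


-- mapping f over A's accumulator loop equals a flatMap of the per-token expansion
theorem map_A_loop (c : PySem.Dict String String) (f : String → String)
    (tokens : List String) (acc : List String) :
    (tokens.foldl (fun a t => if c.contains t then a ++ PySem.Str.split₀ (c.getD t "") else a ++ [t]) acc).map f
      = acc.map f ++ tokens.flatMap (fun t =>
          if c.contains t then (PySem.Str.split₀ (c.getD t "")).map f else [f t]) := by
  induction tokens generalizing acc with
  | nil => simp
  | cons t ts ih =>
      simp only [List.foldl, List.flatMap_cons]
      by_cases h : c.contains t
      · rw [if_pos h, if_pos h, ih, List.map_append, List.append_assoc]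
      · rw [if_neg h, if_neg h, ih, List.map_append, List.append_assoc]; rfl

-- ===== VERDICT (by name: the statement is the Claim_ definition above) =====
theorem map_vocab_spec : Claim_equal_map_vocab := by
  intro tokens contractions dropped_gs _
  show _ = _
  unfold map_vocab map_vocab_alt
  simp only []
  set c := PySem.Dict.mk contractions with hc
  set d := PySem.Dict.mk dropped_gs with hd
  set F : String → List String := fun v => (PySem.Str.split₀ v).map (fun p => d.getD p p) with hF
  rw [map_A_loop c (fun token => d.getD token token) tokens []]
  simp only [List.map_nil, List.nil_append]
  apply List.flatMap_congr
  intro t _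
  have hget : (PySem.Dict.mk (c.items.map (fun kv => (kv.1, F kv.2)))).get? t
      = (c.get? t).map F := get?_mk_map_value F c.items t
  rcases h : c.get? t with _ | v
  · have hcc : c.contains t = false := by
      rw [PySem.Dict.contains_eq_isSome_get?, h]; rfl
    have htc : (PySem.Dict.mk (c.items.map (fun kv => (kv.1, F kv.2)))).contains t = false := by
      rw [PySem.Dict.contains_eq_isSome_get?, hget, h]; rfl
    rw [hcc, htc]
    simp
  · have hcc : c.contains t = true := by
      rw [PySem.Dict.contains_eq_isSome_get?, h]; rfl
    have htc : (PySem.Dict.mk (c.items.map (fun kv => (kv.1, F kv.2)))).contains t = true := by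
      rw [PySem.Dict.contains_eq_isSome_get?, hget, h]; rfl
    rw [hcc, htc]
    simp only [if_pos]
    rw [PySem.Dict.getD_eq_get?_getD, PySem.Dict.getD_eq_get?_getD, hget, h]
    rfl
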